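-- pv_equiv track=rewrite | github.com/EdmonMartirosyan/Homeworks | Homework(R).py | swap_list_elements
-- ===== SOURCE A (Python) =====
-- def swap_list_elements(listt):
--     swaped_list = []
--     pair_index = 0
--     odd_index = 1
--     for i in range(0,len(listt)):
--         if listt[i] % 2 == 0:
--             swaped_list.insert(pair_index, listt[i])
--             pair_index += 2
--         else:
--             swaped_list.insert(odd_index, listt[i])
--             odd_index += 2
--     return swaped_list
-- ===== SOURCE B (Python) =====
-- def swap_list_elements(listt):
--     evens = [x for x in listt if x % 2 == 0]
--     odds = [x for x in listt if x % 2 != 0]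
--     result = []
--     i = 0
--     while i < len(evens) and i < len(odds):
--         result.append(evens[i])
--         result.append(odds[i])
--         i += 1
--     return result + evens[i:] + odds[i:]
-- ===== Notes on version B (the rewrite author's own statement) =====
-- stated objective: alternative
-- what changed: A builds the result with a positional list.insert at a moving even/odd cursor for every element; B partitions the list into evens and odds and then interleaves the two lists, appending the leftover tail, with no positional inserts.
import Mathlib
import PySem

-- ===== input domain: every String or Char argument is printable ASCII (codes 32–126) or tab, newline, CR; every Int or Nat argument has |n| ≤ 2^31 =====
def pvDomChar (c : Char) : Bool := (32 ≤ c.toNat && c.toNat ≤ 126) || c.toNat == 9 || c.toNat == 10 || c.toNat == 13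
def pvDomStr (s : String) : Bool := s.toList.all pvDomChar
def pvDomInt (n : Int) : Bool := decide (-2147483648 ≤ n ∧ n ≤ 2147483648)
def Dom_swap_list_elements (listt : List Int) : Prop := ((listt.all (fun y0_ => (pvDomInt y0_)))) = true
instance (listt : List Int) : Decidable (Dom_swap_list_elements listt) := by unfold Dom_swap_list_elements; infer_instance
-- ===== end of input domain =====

-- B replaces A's positional-insert loop by a partition into evens/odds followed by an
-- interleave of the two lists (objective: alternative algorithm, same observed cost).


-- ===== PORT A =====
-- one loop step of A: state = (swaped_list, pair_index, odd_index)
def swapStepA (st : List Int × Int × Int) (x : Int) : List Int × Int × Int :=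
  if PySem.Int.mod x 2 == 0 then
    (PySem.List.insert st.1 st.2.1 x, st.2.1 + 2, st.2.2)
  else
    (PySem.List.insert st.1 st.2.2 x, st.2.1, st.2.2 + 2)

def swap_list_elements (listt : List Int) : List Int :=
  (listt.foldl swapStepA ([], 0, 1)).1

-- ===== PORT B =====
def evensOf (l : List Int) : List Int := l.filter (fun x => PySem.Int.mod x 2 == 0)
def oddsOf (l : List Int) : List Int := l.filter (fun x => PySem.Int.mod x 2 != 0)

-- Source B's while loop: consume one even and one odd per step, then append the leftovers
def interleave : List Int → List Int → List Int
  | [], ys => ys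
  | xs, [] => xs
  | x :: xs, y :: ys => x :: y :: interleave xs ys

def swap_list_elements_alt (listt : List Int) : List Int :=
  interleave (evensOf listt) (oddsOf listt)

-- ===== PRECONDITION & SPEC =====
def Spec_swap_list_elements (listt : List Int) (out : List Int) : Prop := out = swap_list_elements_alt listt
instance (listt : List Int) (out : List Int) : Decidable (Spec_swap_list_elements listt out) := by unfold Spec_swap_list_elements; infer_instance

-- ===== CLAIM (what is proved, stated in full; the proofs are below) =====
def Claim_equal_swap_list_elements : Prop := ∀ (listt : List Int), Dom_swap_list_elements listt → Spec_swap_list_elements listt (swap_list_elements listt)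

-- ===== LEMMAS AND PROOFS =====
theorem interleave_nil_right (xs : List Int) : interleave xs [] = xs := by
  cases xs <;> rfl

theorem insert_clamp {α : Type} (xs : List α) (n : Nat) (v : α) :
    PySem.List.insert xs (n:Int) v = xs.take n ++ v :: xs.drop n := by
  rcases le_or_gt n xs.length with h | h
  · exact PySem.List.insert_natCast xs n v h
  · have hm : (if (n:Int) < 0 then max ((n:Int) + xs.length) 0 else min (n:Int) xs.length).toNat = xs.length := by
      rw [if_neg (by omega)]
      omega
    simp [PySem.List.insert, PySem.List.sliceIndices, hm,
      List.take_of_length_le (le_of_lt h), List.drop_of_length_le (le_of_lt h)]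

theorem take_drop_even (E O : List Int) (x : Int) :
    (interleave E O).take (2 * E.length) ++ x :: (interleave E O).drop (2 * E.length) =
      interleave (E ++ [x]) O := by
  induction E generalizing O with
  | nil =>
    cases O with
    | nil => rfl
    | cons o O' => rfl
  | cons e E' ih =>
    cases O with
    | nil =>
      have hlen : (interleave (e :: E') []).length ≤ 2 * (e :: E').length := by
        simp [interleave_nil_right]
      rw [List.take_of_length_le hlen, List.drop_of_length_le hlen]
      simp [interleave_nil_right]
    | cons o O' =>
      have h2 : 2 * (e :: E').length = (2 * E'.length) + 1 + 1 := by simp; omega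
      simp only [h2, interleave, List.take_succ_cons, List.drop_succ_cons, List.cons_append]
      simpa [interleave] using congrArg (fun l => e :: o :: l) (ih O')

theorem take_drop_odd (E O : List Int) (y : Int) :
    (interleave E O).take (2 * O.length + 1) ++ y :: (interleave E O).drop (2 * O.length + 1) =
      interleave E (O ++ [y]) := by
  induction O generalizing E with
  | nil =>
    cases E with
    | nil => simp [interleave]
    | cons e E' => simp [interleave, interleave_nil_right]
  | cons o O' ih =>
    cases E with
    | nil =>
      have hlen : (interleave [] (o :: O')).length ≤ 2 * (o :: O').length + 1 := by
        simp [interleave]; omega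
      rw [List.take_of_length_le hlen, List.drop_of_length_le hlen]
      simp [interleave]
    | cons e E' =>
      have h2 : 2 * (o :: O').length + 1 = (2 * O'.length + 1) + 1 + 1 := by simp; omega
      simp only [h2, interleave, List.take_succ_cons, List.drop_succ_cons, List.cons_append]
      simpa [interleave] using congrArg (fun l => e :: o :: l) (ih E')

theorem insert_even (E O : List Int) (x : Int) :
    PySem.List.insert (interleave E O) (2 * (E.length : Int)) x = interleave (E ++ [x]) O := by
  have hc : (2 * (E.length : Int)) = ((2 * E.length : Nat) : Int) := by push_cast; ring
  rw [hc, insert_clamp]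
  exact take_drop_even E O x

theorem insert_odd (E O : List Int) (y : Int) :
    PySem.List.insert (interleave E O) (2 * (O.length : Int) + 1) y = interleave E (O ++ [y]) := by
  have hc : (2 * (O.length : Int) + 1) = ((2 * O.length + 1 : Nat) : Int) := by push_cast; ring
  rw [hc, insert_clamp]
  exact take_drop_odd E O y

theorem loop_inv (l E O : List Int) :
    l.foldl swapStepA (interleave E O, (2 * (E.length : Int), 2 * (O.length : Int) + 1)) =
      (interleave (E ++ evensOf l) (O ++ oddsOf l),
       2 * (((E ++ evensOf l).length : Int)), 2 * (((O ++ oddsOf l).length : Int)) + 1) := by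
  induction l generalizing E O with
  | nil => simp [evensOf, oddsOf]
  | cons x l ih =>
    have hmod : PySem.Int.mod x 2 = x % 2 := PySem.Int.mod_eq_emod_of_pos (by norm_num)
    by_cases h : PySem.Int.mod x 2 = 0
    · have h' : x % 2 = 0 := by rw [hmod] at h; exact h
      have he : evensOf (x :: l) = x :: evensOf l := by simp [evensOf, h']
      have ho : oddsOf (x :: l) = oddsOf l := by simp [oddsOf, h']
      have hb : (PySem.Int.mod x 2 == 0) = true := beq_iff_eq.mpr h
      have hstep : swapStepA (interleave E O, (2 * (E.length : Int), 2 * (O.length : Int) + 1)) x =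
          (interleave (E ++ [x]) O, (2 * (((E ++ [x]).length : Int)), 2 * (O.length : Int) + 1)) := by
        unfold swapStepA
        rw [if_pos hb]
        refine Prod.ext ?_ (Prod.ext ?_ rfl)
        · exact insert_even E O x
        · show 2 * (E.length : Int) + 2 = _
          simp
          omega
      rw [List.foldl_cons, hstep, ih (E ++ [x]) O, he, ho]
      simp
    · have h' : ¬ (x % 2 = 0) := by rw [hmod] at h; exact h
      have he : evensOf (x :: l) = evensOf l := by simp [evensOf, h']
      have ho : oddsOf (x :: l) = x :: oddsOf l := by simp [oddsOf, h']
      have hb : ¬ ((PySem.Int.mod x 2 == 0) = true) := fun hc => h (beq_iff_eq.mp hc)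
      have hstep : swapStepA (interleave E O, (2 * (E.length : Int), 2 * (O.length : Int) + 1)) x =
          (interleave E (O ++ [x]), (2 * (E.length : Int), 2 * (((O ++ [x]).length : Int)) + 1)) := by
        unfold swapStepA
        rw [if_neg hb]
        refine Prod.ext ?_ (Prod.ext rfl ?_)
        · exact insert_odd E O x
        · show 2 * (O.length : Int) + 1 + 2 = _
          simp
          omega
      rw [List.foldl_cons, hstep, ih E (O ++ [x]), he, ho]
      simp

-- ===== VERDICT (by name: the statement is the Claim_ definition above) =====
theorem swap_list_elements_spec : Claim_equal_swap_list_elements := by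
  intro listt _
  unfold Spec_swap_list_elements swap_list_elements swap_list_elements_alt
  have := loop_inv listt [] []
  simp [interleave] at this
  rw [show (([], 0, 1) : List Int × Int × Int) =
        ((interleave [] [] : List Int), (2 * (([] : List Int).length : Int), 2 * (([] : List Int).length : Int) + 1)) by
      simp [interleave]]
  rw [loop_inv listt [] []]
  simp
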